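-- pv_equiv track=rewrite | github.com/DizaPointman/python | plane-tickets/generators.py | assign_seats
-- ===== SOURCE A (Python) =====
-- def assign_seats(passengers):
--     """Assign seats to passengers.
--
--     :param passengers: list[str] - a list of strings containing names of passengers.
--     :return: dict - with the names of the passengers as keys and seat numbers as values.
--
--     Example output: {"Adele": "1A", "Björk": "1B"}
--
--     """
--
--     seat_letters = ['A', 'B', 'C', 'D']
--     number = len(passengers)
--     counter = 0
--     result = {}
--
--     for i in range(number):
--         if i + 1 == 13:
--             continue
--         for j in range(4):
--             if counter < number:
--                 result[passengers[counter]] = f"{i + 1}{seat_letters[j % len(seat_letters)]}"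
--                 counter += 1
--     return result
-- ===== SOURCE B (Python) =====
-- def assign_seats(passengers):
--     """Assign seats to passengers.
--
--     :param passengers: list[str] - a list of strings containing names of passengers.
--     :return: dict - with the names of the passengers as keys and seat numbers as values.
--     """
--     seat_letters = ['A', 'B', 'C', 'D']
--     result = {}
--     for k, name in enumerate(passengers):
--         row = k // 4 + 1
--         if row >= 13:
--             row += 1
--         result[name] = f"{row}{seat_letters[k % 4]}"
--     return result
-- ===== Notes on version B (the rewrite author's own statement) =====
-- stated objective: simpler
-- what changed: Replaced the nested outer-row/inner-seat loops with a bounded counter by a single pass over enumerate(passengers) that computes each passenger's row and letter in closed form from their index (adding 1 to rows >= 13 for the skipped row).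
import Mathlib
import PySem

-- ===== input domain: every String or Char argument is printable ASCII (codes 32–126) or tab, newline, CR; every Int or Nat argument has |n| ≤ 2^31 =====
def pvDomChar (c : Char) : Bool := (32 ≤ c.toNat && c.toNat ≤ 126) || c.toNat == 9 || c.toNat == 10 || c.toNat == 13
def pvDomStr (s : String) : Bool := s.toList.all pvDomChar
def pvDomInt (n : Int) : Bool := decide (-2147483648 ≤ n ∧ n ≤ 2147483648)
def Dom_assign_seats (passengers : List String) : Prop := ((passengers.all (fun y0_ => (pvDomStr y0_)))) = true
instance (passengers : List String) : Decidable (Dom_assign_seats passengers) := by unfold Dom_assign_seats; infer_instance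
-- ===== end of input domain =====

-- B replaces A's nested outer-row/inner-seat loops and counter by a single pass over
-- enumerate(passengers) with closed-form index arithmetic (objective: simpler); the return
-- values are proved equal on all inputs.

-- ===== PORT A =====
def assign_seats (passengers : List String) : List (String × String) :=
  let seat_letters : List String := ["A", "B", "C", "D"]
  let number : Int := PySem.List.len passengers
  let r := (PySem.List.pyRange 0 number 1).foldl
    (fun (st : Int × PySem.Dict String String) i =>
      if i + 1 == 13 then st
      else (PySem.List.pyRange 0 4 1).foldl
        (fun (st : Int × PySem.Dict String String) j =>
          if st.1 < number then
            (st.1 + 1,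
             st.2.insert (PySem.List.pyGetD passengers st.1 "")
               (PySem.Int.toStr (i + 1) ++
                PySem.List.pyGetD seat_letters (PySem.Int.mod j (PySem.List.len seat_letters)) ""))
          else st)
        st)
    ((0 : Int), PySem.Dict.empty)
  r.2.items

-- ===== PORT B =====
def assign_seats_alt (passengers : List String) : List (String × String) :=
  let seat_letters : List String := ["A", "B", "C", "D"]
  ((PySem.List.enumerate passengers 0).foldl
    (fun (result : PySem.Dict String String) kn =>
      let row := PySem.Int.floordiv kn.1 4 + 1
      let row := if 13 ≤ row then row + 1 else row
      result.insert kn.2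
        (PySem.Int.toStr row ++ PySem.List.pyGetD seat_letters (PySem.Int.mod kn.1 4) ""))
    PySem.Dict.empty).items

-- ===== PRECONDITION & SPEC =====
def Spec_assign_seats (passengers : List String) (out : List (String × String)) : Prop := out = assign_seats_alt passengers
instance (passengers : List String) (out : List (String × String)) : Decidable (Spec_assign_seats passengers out) := by unfold Spec_assign_seats; infer_instance

-- ===== CLAIM (what is proved, stated in full; the proofs are below) =====
def Claim_equal_assign_seats : Prop := ∀ (passengers : List String), Dom_assign_seats passengers → Spec_assign_seats passengers (assign_seats passengers)

-- ===== LEMMAS AND PROOFS =====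
def pvRow (k : Nat) : Int := if 13 ≤ k / 4 + 1 then ((k / 4 : Nat) : Int) + 2 else ((k / 4 : Nat) : Int) + 1

def pvLabel (k : Nat) : String :=
  PySem.Int.toStr (pvRow k) ++ ["A", "B", "C", "D"].getD (k % 4) ""

def pvIns (ps : List String) (d : PySem.Dict String String) (k : Nat) : PySem.Dict String String :=
  d.insert (ps.getD k "") (pvLabel k)

def pvAStep (ps : List String) (i : Int) (st : Int × PySem.Dict String String) (j : Int) :
    Int × PySem.Dict String String :=
  if st.1 < PySem.List.len ps then
    (st.1 + 1,
     st.2.insert (PySem.List.pyGetD ps st.1 "")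
       (PySem.Int.toStr (i + 1) ++
        PySem.List.pyGetD ["A", "B", "C", "D"] (PySem.Int.mod j (PySem.List.len ["A", "B", "C", "D"])) ""))
  else st

lemma assign_seats_eq (ps : List String) :
    assign_seats ps =
      ((PySem.List.pyRange 0 (PySem.List.len ps) 1).foldl
        (fun st i => if i + 1 == 13 then st
          else (PySem.List.pyRange 0 4 1).foldl (pvAStep ps i) st)
        ((0 : Int), PySem.Dict.empty)).2.items := rfl

lemma pvAStep_lt (ps : List String) (i : Int) (c : Nat) (d : PySem.Dict String String)
    (hc : c < ps.length) (hi : i + 1 = pvRow c) :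
    pvAStep ps i (((c : Nat) : Int), d) ((c % 4 : Nat) : Int) = (((c + 1 : Nat) : Int), pvIns ps d c) := by
  have h4 : PySem.List.len ["A","B","C","D"] = ((4:Nat):Int) := by decide
  have hmm : c % 4 % 4 = c % 4 := by omega
  have hm : PySem.Int.mod ((c % 4 : Nat) : Int) (PySem.List.len ["A","B","C","D"]) = ((c % 4 : Nat) : Int) := by
    rw [h4, PySem.Int.mod_natCast, hmm]
  have hlt : ((c:Nat):Int) < PySem.List.len ps := by simp [PySem.List.len_eq]; omega
  simp only [pvAStep, hlt, if_pos, hm]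
  rw [hi, PySem.List.pyGetD_natCast, PySem.List.pyGetD_natCast]
  simp only [pvIns, pvLabel, Prod.mk.injEq]
  exact ⟨by push_cast; ring, trivial⟩

lemma pvAStep_ge (ps : List String) (i j : Int) (c : Nat) (d : PySem.Dict String String)
    (hc : ps.length ≤ c) :
    pvAStep ps i (((c : Nat) : Int), d) j = (((c : Nat) : Int), d) := by
  have h : ¬ (((c:Nat):Int) < PySem.List.len ps) := by simp [PySem.List.len_eq]; omega
  simp only [pvAStep]
  rw [if_neg h]

lemma pvRow_block (c j : Nat) (hc : c % 4 = 0) (hj : j < 4) : pvRow (c + j) = pvRow c := by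
  have h : (c + j) / 4 = c / 4 := by omega
  simp [pvRow, h]

lemma pvInner_eq (ps : List String) (i : Int) (c : Nat) (d : PySem.Dict String String)
    (hcn : c ≤ ps.length)
    (h : c < ps.length → c % 4 = 0 ∧ i + 1 = pvRow c) :
    (PySem.List.pyRange 0 4 1).foldl (pvAStep ps i) (((c : Nat) : Int), d)
      = (((min ps.length (c + 4) : Nat) : Int),
         (List.range' c (min ps.length (c + 4) - c)).foldl (pvIns ps) d) := by
  have hr : PySem.List.pyRange 0 4 1 = [0, 1, 2, 3] := by decide
  rw [hr]
  simp only [List.foldl_cons, List.foldl_nil]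
  by_cases h0 : c < ps.length
  · obtain ⟨hc4, hi⟩ := h h0
    have s0 : pvAStep ps i (((c : Nat) : Int), d) 0 = (((c + 1 : Nat) : Int), pvIns ps d c) := by
      have := pvAStep_lt ps i c d h0 hi
      rwa [show (((c % 4 : Nat) : Int)) = 0 by omega] at this
    rw [s0]
    by_cases h1 : c + 1 < ps.length
    · have hi1 : i + 1 = pvRow (c + 1) := hi.trans (pvRow_block c 1 hc4 (by omega)).symm
      have s1 : pvAStep ps i (((c + 1 : Nat) : Int), pvIns ps d c) 1
          = (((c + 2 : Nat) : Int), pvIns ps (pvIns ps d c) (c + 1)) := by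
        have := pvAStep_lt ps i (c + 1) (pvIns ps d c) h1 hi1
        rwa [show ((((c + 1) % 4 : Nat) : Int)) = 1 by omega, show c + 1 + 1 = c + 2 by omega] at this
      rw [s1]
      by_cases h2 : c + 2 < ps.length
      · have hi2 : i + 1 = pvRow (c + 2) := hi.trans (pvRow_block c 2 hc4 (by omega)).symm
        have s2 : pvAStep ps i (((c + 2 : Nat) : Int), pvIns ps (pvIns ps d c) (c + 1)) 2
            = (((c + 3 : Nat) : Int), pvIns ps (pvIns ps (pvIns ps d c) (c + 1)) (c + 2)) := by
          have := pvAStep_lt ps i (c + 2) (pvIns ps (pvIns ps d c) (c + 1)) h2 hi2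
          rwa [show ((((c + 2) % 4 : Nat) : Int)) = 2 by omega, show c + 2 + 1 = c + 3 by omega] at this
        rw [s2]
        by_cases h3 : c + 3 < ps.length
        · have hi3 : i + 1 = pvRow (c + 3) := hi.trans (pvRow_block c 3 hc4 (by omega)).symm
          have s3 : pvAStep ps i (((c + 3 : Nat) : Int), pvIns ps (pvIns ps (pvIns ps d c) (c + 1)) (c + 2)) 3
              = (((c + 4 : Nat) : Int), pvIns ps (pvIns ps (pvIns ps (pvIns ps d c) (c + 1)) (c + 2)) (c + 3)) := by
            have := pvAStep_lt ps i (c + 3) (pvIns ps (pvIns ps (pvIns ps d c) (c + 1)) (c + 2)) h3 hi3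
            rwa [show ((((c + 3) % 4 : Nat) : Int)) = 3 by omega, show c + 3 + 1 = c + 4 by omega] at this
          rw [s3]
          have hm : min ps.length (c + 4) = c + 4 := by omega
          rw [hm, show c + 4 - c = 4 by omega]
          simp [List.range']
        · have hn : ps.length ≤ c + 3 := by omega
          rw [pvAStep_ge ps i 3 (c + 3) _ hn]
          have hm : min ps.length (c + 4) = c + 3 := by omega
          rw [hm, show c + 3 - c = 3 by omega]
          simp [List.range']
      · have hn : ps.length ≤ c + 2 := by omega
        rw [pvAStep_ge ps i 2 (c + 2) _ hn, pvAStep_ge ps i 3 (c + 2) _ hn]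
        have hm : min ps.length (c + 4) = c + 2 := by omega
        rw [hm, show c + 2 - c = 2 by omega]
        simp [List.range']
    · have hn : ps.length ≤ c + 1 := by omega
      rw [pvAStep_ge ps i 1 (c + 1) _ hn, pvAStep_ge ps i 2 (c + 1) _ hn, pvAStep_ge ps i 3 (c + 1) _ hn]
      have hm : min ps.length (c + 4) = c + 1 := by omega
      rw [hm, show c + 1 - c = 1 by omega]
      simp [List.range']
  · have hn : ps.length ≤ c := by omega
    rw [pvAStep_ge ps i 0 c d hn, pvAStep_ge ps i 1 c d hn, pvAStep_ge ps i 2 c d hn,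
        pvAStep_ge ps i 3 c d hn]
    have hm : min ps.length (c + 4) = c := by omega
    rw [hm, show c - c = 0 by omega]
    simp [List.range']

def pvCnt (n m : Nat) : Nat := min n (4 * (if m ≤ 12 then m else m - 1))

lemma pvOuter (ps : List String) (m : Nat) (hm : m ≤ ps.length) :
    (PySem.List.pyRange 0 (m : Int) 1).foldl
      (fun st i => if i + 1 == 13 then st
        else (PySem.List.pyRange 0 4 1).foldl (pvAStep ps i) st)
      ((0 : Int), PySem.Dict.empty)
    = (((pvCnt ps.length m : Nat) : Int),
       (List.range' 0 (pvCnt ps.length m)).foldl (pvIns ps) PySem.Dict.empty) := by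
  induction m with
  | zero =>
      have h0 : PySem.List.pyRange 0 ((0 : Nat) : Int) 1 = [] := by decide
      rw [h0]
      simp [pvCnt]
  | succ m ih =>
      have hm' : m ≤ ps.length := by omega
      have hr : PySem.List.pyRange 0 (((m + 1 : Nat)) : Int) 1
          = PySem.List.pyRange 0 ((m : Nat) : Int) 1 ++ [((m : Nat) : Int)] := by
        rw [show (((m + 1 : Nat)) : Int) = ((m : Nat) : Int) + 1 by push_cast; ring]
        exact PySem.List.pyRange_one_succ_right (by omega)
      rw [hr, List.foldl_append, ih hm']
      simp only [List.foldl_cons, List.foldl_nil]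
      by_cases h13 : m = 12
      · subst h13
        have ht : (((12 : Nat) : Int) + 1 == 13) = true := by decide
        rw [ht]
        have hc : pvCnt ps.length 13 = pvCnt ps.length 12 := by simp [pvCnt]
        simp [hc]
      · have hne : (((m : Nat) : Int) + 1 == 13) = false := by simp; omega
        rw [hne]
        simp only [Bool.false_eq_true, if_false]
        have hkey : pvCnt ps.length m < ps.length →
            pvCnt ps.length m % 4 = 0 ∧ ((m : Nat) : Int) + 1 = pvRow (pvCnt ps.length m) := by
          intro hlt
          have h1 : pvCnt ps.length m = 4 * (if m ≤ 12 then m else m - 1) := by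
            unfold pvCnt at *; omega
          refine ⟨by omega, ?_⟩
          unfold pvRow
          split_ifs with h' <;> (rw [h1] at *; split_ifs at * <;> omega)
        rw [pvInner_eq ps ((m : Nat) : Int) (pvCnt ps.length m) _ (by unfold pvCnt; omega) hkey]
        have hc' : pvCnt ps.length (m + 1) = min ps.length (pvCnt ps.length m + 4) := by
          unfold pvCnt; split_ifs at * <;> omega
        rw [hc', ← List.foldl_append]
        have hsum : pvCnt ps.length m + (min ps.length (pvCnt ps.length m + 4) - pvCnt ps.length m)
            = min ps.length (pvCnt ps.length m + 4) := by unfold pvCnt; omega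
        have hsplit : List.range' 0 (pvCnt ps.length m) ++
            List.range' (pvCnt ps.length m) (min ps.length (pvCnt ps.length m + 4) - pvCnt ps.length m)
            = List.range' 0 (min ps.length (pvCnt ps.length m + 4)) := by
          have h := List.range'_append (s := 0) (m := pvCnt ps.length m)
            (n := min ps.length (pvCnt ps.length m + 4) - pvCnt ps.length m) (step := 1)
          rw [hsum] at h
          simpa using h
        rw [hsplit]

def pvBStep (d : PySem.Dict String String) (kn : Int × String) : PySem.Dict String String :=
  let row := PySem.Int.floordiv kn.1 4 + 1
  let row := if 13 ≤ row then row + 1 else row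
  d.insert kn.2 (PySem.Int.toStr row ++ PySem.List.pyGetD ["A", "B", "C", "D"] (PySem.Int.mod kn.1 4) "")

lemma pvBStep_eq (d : PySem.Dict String String) (k : Nat) (x : String) :
    pvBStep d (((k : Nat) : Int), x) = d.insert x (pvLabel k) := by
  have hf : PySem.Int.floordiv ((k : Nat) : Int) 4 = ((k / 4 : Nat) : Int) := by
    exact_mod_cast PySem.Int.floordiv_natCast k 4
  have hmo : PySem.Int.mod ((k : Nat) : Int) 4 = ((k % 4 : Nat) : Int) := by
    exact_mod_cast PySem.Int.mod_natCast k 4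
  have hg : PySem.List.pyGetD ["A", "B", "C", "D"] (((k % 4 : Nat)) : Int) ""
      = ["A", "B", "C", "D"].getD (k % 4) "" := PySem.List.pyGetD_natCast _ _ _
  simp only [pvBStep, hf, hmo, hg, pvLabel, pvRow]
  congr 2
  by_cases h : 13 ≤ k / 4 + 1
  · rw [if_pos h, if_pos (by exact_mod_cast (by omega : (13:Int) ≤ ((k/4:Nat):Int) + 1)),
        show ((k / 4 : Nat) : Int) + 1 + 1 = ((k / 4 : Nat) : Int) + 2 by ring]
  · rw [if_neg h, if_neg (by omega)]

lemma pvB_fold (xs : List String) : ∀ (s : Nat) (d : PySem.Dict String String),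
    (PySem.List.enumerate xs ((s : Nat) : Int)).foldl pvBStep d
      = (List.range' s xs.length).foldl (fun d k => d.insert (xs.getD (k - s) "") (pvLabel k)) d := by
  induction xs with
  | nil => intro s d; simp [PySem.List.enumerate_nil]
  | cons x t ih =>
      intro s d
      rw [PySem.List.enumerate_cons, List.foldl_cons,
          show ((s : Nat) : Int) + 1 = (((s + 1 : Nat)) : Int) by push_cast; ring, ih (s + 1),
          show (x :: t).length = t.length + 1 from rfl, List.range'_succ, List.foldl_cons]
      rw [pvBStep_eq]
      have hcongr : (List.range' (s + 1) t.length).foldl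
            (fun d k => d.insert (t.getD (k - (s + 1)) "") (pvLabel k))
            (d.insert x (pvLabel s))
          = (List.range' (s + 1) t.length).foldl
            (fun d k => d.insert ((x :: t).getD (k - s) "") (pvLabel k))
            (d.insert x (pvLabel s)) := by
        apply PySem.List.foldl_congr_mem
        intro acc k hk
        have hk1 : s + 1 ≤ k := by
          have := List.mem_range'.mp hk
          omega
        have : k - s = (k - (s + 1)) + 1 := by omega
        rw [this]
        rfl
      rw [hcongr]
      congr 1
      simp

lemma assign_seats_alt_eq (ps : List String) :
    assign_seats_alt ps = ((PySem.List.enumerate ps 0).foldl pvBStep PySem.Dict.empty).items := rfl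

lemma pv_final (ps : List String) : assign_seats ps = assign_seats_alt ps := by
  have hA : assign_seats ps
      = ((List.range' 0 ps.length).foldl (pvIns ps) PySem.Dict.empty).items := by
    rw [assign_seats_eq, PySem.List.len_eq, pvOuter ps ps.length le_rfl]
    have hc : pvCnt ps.length ps.length = ps.length := by unfold pvCnt; split_ifs <;> omega
    rw [hc]
  have hB : assign_seats_alt ps
      = ((List.range' 0 ps.length).foldl (pvIns ps) PySem.Dict.empty).items := by
    rw [assign_seats_alt_eq, show (0 : Int) = ((0 : Nat) : Int) from rfl,
        pvB_fold ps 0 PySem.Dict.empty]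
    congr 1
  rw [hA, hB]

-- ===== VERDICT (by name: the statement is the Claim_ definition above) =====
theorem assign_seats_spec : Claim_equal_assign_seats := by
  intro passengers _
  unfold Spec_assign_seats
  exact pv_final passengers
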